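-- pv_equiv track=rewrite | github.com/mbaljko/vault-grading-pipeline | 01_units/pipelines/pl1C_rubric_devt/python/generate-scoring-stats-for-manifest.py | build_coincidence_count_matrix
-- ===== SOURCE A (Python) =====
-- def build_coincidence_count_matrix(
-- 	template_ids: list[str],
-- 	positive_submission_ids_by_template: dict[str, set[str]],
-- ) -> dict[str, dict[str, int]]:
-- 	count_matrix: dict[str, dict[str, int]] = {}
-- 	for row_template_id in template_ids:
-- 		count_matrix[row_template_id] = {}
-- 		row_submission_ids = positive_submission_ids_by_template.get(row_template_id, set())
-- 		for column_template_id in template_ids: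
-- 			column_submission_ids = positive_submission_ids_by_template.get(column_template_id, set())
-- 			count_matrix[row_template_id][column_template_id] = len(row_submission_ids & column_submission_ids)
-- 	return count_matrix
-- ===== SOURCE B (Python) =====
-- def build_coincidence_count_matrix(
-- 	template_ids: list[str],
-- 	positive_submission_ids_by_template: dict[str, set[str]],
-- ) -> dict[str, dict[str, int]]:
-- 	# Invert to submission -> templates, then count coincidences per submission.
-- 	ids = list(dict.fromkeys(template_ids))
-- 	templates_by_submission: dict[str, list[str]] = {}
-- 	for template_id in ids:
-- 		for submission_id in positive_submission_ids_by_template.get(template_id, set()):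
-- 			templates_by_submission.setdefault(submission_id, []).append(template_id)
-- 	pair_counts: dict[tuple[str, str], int] = {}
-- 	for templates in templates_by_submission.values():
-- 		for row_template_id in templates:
-- 			for column_template_id in templates:
-- 				key = (row_template_id, column_template_id)
-- 				pair_counts[key] = pair_counts.get(key, 0) + 1
-- 	return {
-- 		row_template_id: {
-- 			column_template_id: pair_counts.get((row_template_id, column_template_id), 0)
-- 			for column_template_id in ids
-- 		}
-- 		for row_template_id in ids
-- 	}
-- ===== Notes on version B (the rewrite author's own statement) =====
-- stated objective: faster
-- what changed: Instead of intersecting every pair of templates' submission sets (T^2 set intersections), B inverts the map to submission->templates once and increments a pair counter per submission, then reads the matrix out of the counter.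
import Mathlib
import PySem

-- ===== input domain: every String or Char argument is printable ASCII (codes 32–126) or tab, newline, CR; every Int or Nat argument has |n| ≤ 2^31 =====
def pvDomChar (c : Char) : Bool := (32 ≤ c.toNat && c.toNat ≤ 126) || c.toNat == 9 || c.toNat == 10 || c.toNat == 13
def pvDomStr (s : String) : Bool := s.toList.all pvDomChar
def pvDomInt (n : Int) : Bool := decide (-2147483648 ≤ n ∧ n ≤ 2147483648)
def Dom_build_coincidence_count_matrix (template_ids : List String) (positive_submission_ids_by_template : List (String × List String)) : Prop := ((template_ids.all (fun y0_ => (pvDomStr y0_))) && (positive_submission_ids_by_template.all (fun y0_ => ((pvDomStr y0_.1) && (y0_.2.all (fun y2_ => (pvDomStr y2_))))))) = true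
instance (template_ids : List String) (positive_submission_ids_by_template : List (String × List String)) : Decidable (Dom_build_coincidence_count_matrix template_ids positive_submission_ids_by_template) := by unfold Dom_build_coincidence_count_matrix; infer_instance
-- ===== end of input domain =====

-- B replaces A's T^2 pairwise set intersections by one inversion to submission->templates
-- plus a per-submission pair counter; proved to return the same matrix everywhere.

-- ===== PORT A =====
-- A: for each row template, for each column template, intersect the two positive-submission
-- sets (looked up with .get(_, set())) and store the intersection size.
def build_coincidence_count_matrix (template_ids : List String) (positive_submission_ids_by_template : List (String × List String)) : List (String × List (String × Int)) :=
  let d : PySem.Dict String (List String) := PySem.Dict.mk positive_submission_ids_by_template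
  let m : PySem.Dict String (PySem.Dict String Int) :=
    template_ids.foldl (fun m row_template_id =>
      let row_submission_ids : PySem.Set String := PySem.Set.ofList (d.getD row_template_id [])
      template_ids.foldl (fun m column_template_id =>
        let column_submission_ids : PySem.Set String := PySem.Set.ofList (d.getD column_template_id [])
        m.insert row_template_id ((m.getD row_template_id PySem.Dict.empty).insert column_template_id ((PySem.Set.inter row_submission_ids column_submission_ids).length : Int)))
        (m.insert row_template_id PySem.Dict.empty))
      PySem.Dict.empty
  m.items.map (fun p => (p.1, p.2.items))

-- ===== PORT B =====
-- B: dedup template ids, invert to submission -> list of templates whose set holds it,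
-- count template pairs per submission, read the matrix out of the counter.
def build_coincidence_count_matrix_alt (template_ids : List String) (positive_submission_ids_by_template : List (String × List String)) : List (String × List (String × Int)) :=
  let d : PySem.Dict String (List String) := PySem.Dict.mk positive_submission_ids_by_template
  let ids : List String := PySem.List.dedup template_ids
  let templates_by_submission : PySem.Dict String (List String) :=
    ids.foldl (fun inv template_id =>
      (PySem.Set.ofList (d.getD template_id [])).foldl (fun inv submission_id =>
        inv.modify submission_id [] (· ++ [template_id])) inv)
      PySem.Dict.empty
  let pair_counts : PySem.Dict (String × String) Int :=
    templates_by_submission.values.foldl (fun p templates =>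
      templates.foldl (fun p row_template_id =>
        templates.foldl (fun p column_template_id =>
          p.modify (row_template_id, column_template_id) 0 (· + 1)) p) p)
      PySem.Dict.empty
  ids.map (fun row_template_id =>
    (row_template_id, ids.map (fun column_template_id =>
      (column_template_id, pair_counts.getD (row_template_id, column_template_id) 0))))

-- ===== PRECONDITION & SPEC =====
def Spec_build_coincidence_count_matrix (template_ids : List String) (positive_submission_ids_by_template : List (String × List String)) (out : List (String × List (String × Int))) : Prop := out = build_coincidence_count_matrix_alt template_ids positive_submission_ids_by_template
instance (template_ids : List String) (positive_submission_ids_by_template : List (String × List String)) (out : List (String × List (String × Int))) : Decidable (Spec_build_coincidence_count_matrix template_ids positive_submission_ids_by_template out) := by unfold Spec_build_coincidence_count_matrix; infer_instance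

-- ===== CLAIM (what is proved, stated in full; the proofs are below) =====
def Claim_equal_build_coincidence_count_matrix : Prop := ∀ (template_ids : List String) (positive_submission_ids_by_template : List (String × List String)), Dom_build_coincidence_count_matrix template_ids positive_submission_ids_by_template → Spec_build_coincidence_count_matrix template_ids positive_submission_ids_by_template (build_coincidence_count_matrix template_ids positive_submission_ids_by_template)

-- ===== LEMMAS AND PROOFS =====

-- A's inner loop writes count_matrix[rt][ct] through the outer dict; repeated inserts at the
-- same key rt collapse to one insert of the inner dict built on its own.
theorem pv_inner_collapse {ν : Type} (l : List String) (rt : String)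
    (val : String → ν) (m : PySem.Dict String (PySem.Dict String ν)) (inner0 : PySem.Dict String ν) :
    l.foldl (fun m ct => m.insert rt ((m.getD rt PySem.Dict.empty).insert ct (val ct))) (m.insert rt inner0)
      = m.insert rt (l.foldl (fun dm ct => dm.insert ct (val ct)) inner0) := by
  induction l generalizing inner0 with
  | nil => rfl
  | cons a t ih =>
    simp only [List.foldl_cons]
    rw [PySem.Dict.getD_insert_self, PySem.Dict.insert_insert_self, ih]

-- a fold of inserts whose value depends only on the key: lookup afterwards
theorem pv_getD_foldl_insert_keyval {ν : Type} (l : List String) (f : String → ν)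
    (d : PySem.Dict String ν) (k : String) (v0 : ν) :
    (l.foldl (fun d x => d.insert x (f x)) d).getD k v0 = if k ∈ l then f k else d.getD k v0 := by
  induction l generalizing d with
  | nil => simp
  | cons a t ih =>
    simp only [List.foldl_cons, ih, List.mem_cons]
    by_cases h : k ∈ t
    · simp [h]
    · by_cases hk : k = a <;> simp [h, hk, PySem.Dict.getD_insert]

-- its items are one entry per distinct key, in first-occurrence order
theorem pv_items_foldl_insert_keyval {ν : Type} (l : List String) (f : String → ν) :
    (l.foldl (fun d x => d.insert x (f x)) (PySem.Dict.empty : PySem.Dict String ν)).items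
      = (PySem.Set.ofList l).map (fun k => (k, f k)) := by
  cases l with
  | nil => rfl
  | cons a t =>
    rw [PySem.Dict.items_eq_map_keys _ (PySem.Dict.nodup_keys_foldl_insert _ _ _ (by simp)) (f a)]
    rw [PySem.Dict.keys_foldl_insert]
    apply List.map_congr_left
    intro k hk
    have hk' : k ∈ a :: t := (PySem.Set.mem_ofList _ _).mp hk
    rw [pv_getD_foldl_insert_keyval]
    simp [hk']

-- A's result, in closed form over the deduped ids
theorem pv_A_closed (template_ids : List String) (positive_submission_ids_by_template : List (String × List String)) :
    build_coincidence_count_matrix template_ids positive_submission_ids_by_template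
      = (PySem.Set.ofList template_ids).map (fun r =>
          (r, (PySem.Set.ofList template_ids).map (fun c =>
            (c, ((PySem.Set.inter
                  (PySem.Set.ofList ((PySem.Dict.mk positive_submission_ids_by_template).getD r []))
                  (PySem.Set.ofList ((PySem.Dict.mk positive_submission_ids_by_template).getD c []))).length : Int))))) := by
  unfold build_coincidence_count_matrix
  set d := PySem.Dict.mk positive_submission_ids_by_template with hd
  set val : String → String → Int := fun r c =>
    ((PySem.Set.inter (PySem.Set.ofList (d.getD r [])) (PySem.Set.ofList (d.getD c []))).length : Int) with hval
  have h1 : template_ids.foldl (fun m row_template_id =>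
        template_ids.foldl (fun m column_template_id =>
          m.insert row_template_id ((m.getD row_template_id PySem.Dict.empty).insert column_template_id (val row_template_id column_template_id)))
          (m.insert row_template_id PySem.Dict.empty)) PySem.Dict.empty
      = template_ids.foldl (fun m rt => m.insert rt (template_ids.foldl (fun dm ct => dm.insert ct (val rt ct)) PySem.Dict.empty)) PySem.Dict.empty := by
    apply PySem.List.foldl_congr_mem
    intro m rt _
    exact pv_inner_collapse template_ids rt (val rt) m PySem.Dict.empty
  simp only []
  rw [h1, pv_items_foldl_insert_keyval, List.map_map]
  apply List.map_congr_left
  intro r _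
  simp only [Function.comp]
  rw [pv_items_foldl_insert_keyval]

-- membership-filter on a nodup list, as a sub-singleton
theorem pv_filter_beq_of_nodup (l : List String) (hl : l.Nodup) (s : String) :
    l.filter (fun x => x == s) = if s ∈ l then [s] else [] := by
  induction l with
  | nil => simp
  | cons a t ih =>
    rcases List.nodup_cons.mp hl with ⟨ha, ht⟩
    by_cases h : a = s
    · subst h
      simp [ih ht, ha]
    · simp [h, ih ht, Ne.symm h]

-- the inversion fold over ids equals one fold over the flattened (submission, template) pairs
theorem pv_inv_flat (ids : List String) (S : String → List String) (inv : PySem.Dict String (List String)) :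
    ids.foldl (fun inv t => (S t).foldl (fun inv s => inv.modify s [] (· ++ [t])) inv) inv
      = (ids.flatMap (fun t => (S t).map (fun s => (s, t)))).foldl
          (fun inv p => inv.modify p.1 [] (· ++ [p.2])) inv := by
  induction ids generalizing inv with
  | nil => rfl
  | cons a t ih => simp [List.foldl_cons, List.foldl_append, List.foldl_map, ih]

-- what the inverted dict holds at a submission key
theorem pv_inv_getD (ids : List String) (S : String → List String) (hS : ∀ t, (S t).Nodup) (s : String) :
    ((ids.flatMap (fun t => (S t).map (fun s => (s, t)))).foldl
        (fun inv p => inv.modify p.1 [] (· ++ [p.2])) (PySem.Dict.empty : PySem.Dict String (List String))).getD s []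
      = ids.filter (fun t => (S t).contains s) := by
  rw [PySem.Dict.getD_foldl_modify_append]
  simp only [PySem.Dict.getD_empty, List.nil_append]
  induction ids with
  | nil => simp
  | cons a t ih =>
    simp only [List.flatMap_cons, List.filter_append, List.map_append, ih, List.filter_cons]
    rw [List.filter_map]
    rw [show ((fun (p : String × String) => p.1 == s) ∘ (fun s' => (s', a))) = (fun s' => s' == s) from rfl]
    rw [pv_filter_beq_of_nodup _ (hS a) s]
    by_cases h : s ∈ S a <;> simp [h]

-- one pass of B's column loop on the pair counter
theorem pv_pc_step (ts : List String) (rt r c : String) (p : PySem.Dict (String × String) Int) :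
    (ts.foldl (fun p ct => p.modify (rt, ct) 0 (· + 1)) p).getD (r, c) 0
      = p.getD (r, c) 0 + if rt = r then (ts.count c : Int) else 0 := by
  rw [show (ts.foldl (fun p ct => p.modify (rt, ct) 0 (· + 1)) p)
        = ((ts.map (fun ct => (rt, ct))).foldl (fun p x => p.modify x 0 (· + 1)) p) from (List.foldl_map (f := fun ct => (rt, ct)) (g := fun p x => p.modify x 0 (· + 1)) (l := ts) (init := p)).symm]
  rw [PySem.Dict.getD_foldl_modify_add_one]
  congr 1
  by_cases h : rt = r
  · subst h
    simp only [if_true]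
    norm_cast
    exact List.count_map_of_injective ts (fun ct => (rt, ct)) (fun a b hab => by simpa using hab) c
  · rw [if_neg h, List.count_eq_zero_of_not_mem (by
        intro hmem
        rcases List.mem_map.mp hmem with ⟨x, _, hx⟩
        exact h (congrArg Prod.fst hx))]
    rfl

theorem pv_pc_outer (l ts : List String) (hl : l.Nodup) (r c : String) (p : PySem.Dict (String × String) Int) :
    (l.foldl (fun p rt => ts.foldl (fun p ct => p.modify (rt, ct) 0 (· + 1)) p) p).getD (r, c) 0
      = p.getD (r, c) 0 + if r ∈ l then (ts.count c : Int) else 0 := by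
  induction l generalizing p with
  | nil => simp
  | cons a t ih =>
    rcases List.nodup_cons.mp hl with ⟨ha, ht⟩
    simp only [List.foldl_cons]
    rw [ih ht, pv_pc_step]
    by_cases h : a = r
    · subst h; simp [ha]
    · by_cases h2 : r ∈ t <;> simp [h, h2, Ne.symm h]

-- both loops over one submission's (nodup) template list add the coincidence indicator
theorem pv_pc_inner (ts : List String) (hts : ts.Nodup) (r c : String) (p : PySem.Dict (String × String) Int) :
    (ts.foldl (fun p rt => ts.foldl (fun p ct => p.modify (rt, ct) 0 (· + 1)) p) p).getD (r, c) 0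
      = p.getD (r, c) 0 + (if r ∈ ts ∧ c ∈ ts then 1 else 0) := by
  rw [pv_pc_outer ts ts hts r c p]
  congr 1
  by_cases hr : r ∈ ts
  · by_cases hc : c ∈ ts
    · simp [hr, hc, List.count_eq_one_of_mem hts hc]
    · simp [hr, hc, List.count_eq_zero_of_not_mem hc]
  · simp [hr]

-- the pair counter counts the submissions whose template list holds both r and c
theorem pv_pc_getD (L : List (List String)) (hL : ∀ ts ∈ L, ts.Nodup) (r c : String)
    (p : PySem.Dict (String × String) Int) :
    (L.foldl (fun p ts => ts.foldl (fun p rt => ts.foldl (fun p ct => p.modify (rt, ct) 0 (· + 1)) p) p) p).getD (r, c) 0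
      = p.getD (r, c) 0 + ((L.countP (fun ts => ts.contains r && ts.contains c) : Nat) : Int) := by
  induction L generalizing p with
  | nil => simp
  | cons a t ih =>
    simp only [List.foldl_cons]
    rw [ih (fun ts hts => hL ts (List.mem_cons_of_mem a hts)),
        pv_pc_inner a (hL a (List.mem_cons_self)) r c p, List.countP_cons]
    by_cases hr : r ∈ a <;> by_cases hc : c ∈ a <;>
      · simp [hr, hc]
        try ring

-- two nodup lists counting the same set of elements have equal counts
theorem pv_countP_eq_of_nodup (l₁ l₂ : List String) (p₁ p₂ : String → Bool)
    (h₁ : l₁.Nodup) (h₂ : l₂.Nodup)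
    (h : ∀ s, (s ∈ l₁ ∧ p₁ s) ↔ (s ∈ l₂ ∧ p₂ s)) :
    l₁.countP p₁ = l₂.countP p₂ := by
  rw [List.countP_eq_length_filter, List.countP_eq_length_filter,
      ← List.toFinset_card_of_nodup (List.Nodup.filter _ h₁),
      ← List.toFinset_card_of_nodup (List.Nodup.filter _ h₂)]
  congr 1
  ext s
  simp only [List.mem_toFinset, List.mem_filter]
  exact h s

-- ===== VERDICT (by name: the statement is the Claim_ definition above) =====
theorem build_coincidence_count_matrix_spec : Claim_equal_build_coincidence_count_matrix := by
  intro template_ids pos _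
  unfold Spec_build_coincidence_count_matrix
  rw [pv_A_closed]
  unfold build_coincidence_count_matrix_alt
  simp only []
  rw [show PySem.List.dedup template_ids = PySem.Set.ofList template_ids from rfl]
  set d := PySem.Dict.mk pos with hd
  have hSn : ∀ t, (PySem.Set.ofList (d.getD t [])).Nodup := fun t => PySem.Set.nodup_ofList _
  set ids : List String := PySem.Set.ofList template_ids with hids
  have hidsn : ids.Nodup := PySem.Set.nodup_ofList _
  set pairs : List (String × String) :=
    ids.flatMap (fun t => (PySem.Set.ofList (d.getD t [])).map (fun s => (s, t))) with hpairs
  -- the inverted dict, as one fold over (submission, template) pairs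
  have hinv : (ids.foldl (fun inv t =>
        (PySem.Set.ofList (d.getD t [])).foldl (fun inv s => inv.modify s [] (· ++ [t])) inv)
        (PySem.Dict.empty : PySem.Dict String (List String)))
      = pairs.foldl (fun inv p => inv.modify p.1 [] (· ++ [p.2])) PySem.Dict.empty :=
    pv_inv_flat ids (fun t => PySem.Set.ofList (d.getD t [])) PySem.Dict.empty
  rw [hinv]
  set inv := pairs.foldl (fun inv p => inv.modify p.1 [] (· ++ [p.2]))
      (PySem.Dict.empty : PySem.Dict String (List String)) with hinvdef
  have hgetD : ∀ s, inv.getD s [] = ids.filter (fun t => (PySem.Set.ofList (d.getD t [])).contains s) :=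
    fun s => pv_inv_getD ids (fun t => PySem.Set.ofList (d.getD t [])) hSn s
  have hkeysn : inv.keys.Nodup := PySem.Dict.nodup_keys_foldl_modify_key pairs Prod.fst [] _ _ (by simp)
  have hmemkeys : ∀ s, s ∈ inv.keys ↔ ∃ t ∈ ids, s ∈ PySem.Set.ofList (d.getD t []) := by
    intro s
    rw [hinvdef, PySem.Dict.keys_foldl_modify_key pairs Prod.fst [] _ _]
    have h0 : s ∈ PySem.Set.update (PySem.Dict.empty : PySem.Dict String (List String)).keys (pairs.map Prod.fst)
        ↔ s ∈ pairs.map Prod.fst := by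
      rw [show (PySem.Dict.empty : PySem.Dict String (List String)).keys = [] from rfl]
      exact PySem.Set.mem_ofList _ _
    rw [h0, hpairs]
    simp only [List.mem_map, List.mem_flatMap]
    constructor
    · rintro ⟨p, ⟨t, ht, hp⟩, hfst⟩
      rcases hp with ⟨s', hs', rfl⟩
      obtain rfl : s' = s := hfst
      exact ⟨t, ht, hs'⟩
    · rintro ⟨t, ht, hst⟩
      exact ⟨(s, t), ⟨t, ht, ⟨s, hst, rfl⟩⟩, rfl⟩
  have hvalues : inv.values = inv.keys.map (fun s => inv.getD s []) :=
    PySem.Dict.values_eq_map_keys inv hkeysn []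
  -- the matrices agree entrywise
  apply List.map_congr_left
  intro r hr
  have hrids : r ∈ ids := hr
  refine congrArg (fun x => (r, x)) ?_
  apply List.map_congr_left
  intro c hc
  have hcids : c ∈ ids := hc
  refine congrArg (fun x => (c, x)) ?_
  rw [pv_pc_getD _ (by
        intro ts hts
        rw [hvalues] at hts
        rcases List.mem_map.mp hts with ⟨s, _, rfl⟩
        rw [hgetD s]
        exact List.Nodup.filter _ hidsn) r c PySem.Dict.empty]
  rw [show (PySem.Dict.empty : PySem.Dict (String × String) Int).getD (r, c) 0 = 0 from rfl, zero_add]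
  rw [hvalues, List.countP_map]
  have hcount : inv.keys.countP ((fun ts => ts.contains r && ts.contains c) ∘ (fun s => inv.getD s []))
      = (PySem.Set.ofList (d.getD r [])).countP (fun s => (PySem.Set.ofList (d.getD c [])).contains s) := by
    apply pv_countP_eq_of_nodup _ _ _ _ hkeysn (hSn r)
    intro s
    simp only [Function.comp, hgetD s, List.contains_iff_mem, List.mem_filter,
      Bool.and_eq_true]
    constructor
    · rintro ⟨hk, ⟨⟨_, hsr⟩, ⟨_, hsc⟩⟩⟩
      exact ⟨by simpa using hsr, by simpa using hsc⟩
    · rintro ⟨hsr, hsc⟩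
      exact ⟨(hmemkeys s).mpr ⟨r, hrids, hsr⟩, ⟨⟨hrids, by simpa using hsr⟩, ⟨hcids, by simpa using hsc⟩⟩⟩
  rw [hcount]
  rw [show (PySem.Set.inter (PySem.Set.ofList (d.getD r [])) (PySem.Set.ofList (d.getD c [])))
        = (PySem.Set.ofList (d.getD r [])).filter (fun s => (PySem.Set.ofList (d.getD c [])).contains s) from rfl]
  rw [← List.countP_eq_length_filter]
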